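-- pv_equiv track=rewrite | github.com/khurramkhalil/fair-compress | base_poc.py | generate_counterfactual_prompt_pairs
-- ===== SOURCE A (Python) =====
-- from typing import Dict, List, Tuple, Optional
--
-- def generate_counterfactual_prompt_pairs(n_pairs: int) -> List[Tuple[str, str]]:
--     """Generate counterfactual prompt pairs for STL evaluation"""
--     templates = [
--         "The {} doctor examined the patient and",
--         "The {} engineer solved the problem by",
--         "The {} teacher explained the concept and",
--         "The {} nurse provided care and",
--         "The {} scientist discovered that",
--         "The {} lawyer argued that",
--         "The {} manager decided to",
--         "The {} programmer wrote code that",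
--         "The {} researcher found that",
--         "The {} consultant recommended that"
--     ]
--
--     pairs = []
--     for i in range(n_pairs):
--         template = templates[i % len(templates)]
--         male_prompt = template.format("male")
--         female_prompt = template.format("female")
--         pairs.append((male_prompt, female_prompt))
--
--     return pairs
-- ===== SOURCE B (Python) =====
-- def generate_counterfactual_prompt_pairs(n_pairs):
--     templates = [
--         "The {} doctor examined the patient and",
--         "The {} engineer solved the problem by",
--         "The {} teacher explained the concept and",
--         "The {} nurse provided care and",
--         "The {} scientist discovered that",
--         "The {} lawyer argued that",
--         "The {} manager decided to",
--         "The {} programmer wrote code that",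
--         "The {} researcher found that",
--         "The {} consultant recommended that"
--     ]
--     formatted = [(t.format("male"), t.format("female")) for t in templates]
--     reps = -(-n_pairs // len(formatted))   # ceil(n_pairs / 10); 0 for n_pairs <= 0
--     return (formatted * reps)[:n_pairs]
-- ===== Notes on version B (the rewrite author's own statement) =====
-- stated objective: faster
-- what changed: B formats the template pairs once, then builds the result by block replication — repeating that table ceil(n_pairs/len) times with list multiplication and truncating to n_pairs by a slice — instead of A's per-iteration loop that modulo-indexes the templates and formats two strings each step.
import Mathlib
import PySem

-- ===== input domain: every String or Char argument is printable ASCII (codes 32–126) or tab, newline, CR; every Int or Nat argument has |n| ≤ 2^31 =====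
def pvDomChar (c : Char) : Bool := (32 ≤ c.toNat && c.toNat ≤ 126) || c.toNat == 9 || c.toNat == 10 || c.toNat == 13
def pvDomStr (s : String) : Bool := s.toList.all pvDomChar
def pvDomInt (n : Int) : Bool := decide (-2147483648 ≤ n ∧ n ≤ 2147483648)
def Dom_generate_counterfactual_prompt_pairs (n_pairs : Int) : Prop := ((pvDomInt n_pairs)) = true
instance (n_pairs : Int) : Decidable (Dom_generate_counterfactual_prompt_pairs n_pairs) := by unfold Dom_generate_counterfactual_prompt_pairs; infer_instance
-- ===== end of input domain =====

-- B replaces A's per-iteration modulo-indexed formatting loop by block replication: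
-- format the 10 pairs once, repeat that block ceil(n/10) times, truncate to n (objective: faster; measured faster in a timing run).

-- ===== PORT A =====
-- templates list of A; each template contains exactly one "{}", so Python's
-- template.format(x) equals replacing "{}" by x (PySem.Str.replace is exact here).
def pvTemplatesA : List String := [
  "The {} doctor examined the patient and",
  "The {} engineer solved the problem by",
  "The {} teacher explained the concept and",
  "The {} nurse provided care and",
  "The {} scientist discovered that",
  "The {} lawyer argued that",
  "The {} manager decided to",
  "The {} programmer wrote code that",
  "The {} researcher found that",
  "The {} consultant recommended that"]

def generate_counterfactual_prompt_pairs (n_pairs : Int) : List (String × String) :=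
  (PySem.List.pyRange 0 n_pairs 1).foldl (fun pairs i =>
    let template := PySem.List.pyGetD pvTemplatesA (PySem.Int.mod i (pvTemplatesA.length : Int)) ""
    let male_prompt := PySem.Str.replace template "{}" "male"
    let female_prompt := PySem.Str.replace template "{}" "female"
    pairs ++ [(male_prompt, female_prompt)]) []

-- ===== PORT B =====
def pvTemplatesB : List String := [
  "The {} doctor examined the patient and",
  "The {} engineer solved the problem by",
  "The {} teacher explained the concept and",
  "The {} nurse provided care and",
  "The {} scientist discovered that",
  "The {} lawyer argued that",
  "The {} manager decided to",
  "The {} programmer wrote code that",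
  "The {} researcher found that",
  "The {} consultant recommended that"]

-- formatted = [(t.format("male"), t.format("female")) for t in templates]
def pvFormattedB : List (String × String) :=
  pvTemplatesB.map (fun t => (PySem.Str.replace t "{}" "male", PySem.Str.replace t "{}" "female"))

-- reps = -(-n // 10); Python's 'formatted * reps' is [] for reps ≤ 0, hence reps.toNat copies
def generate_counterfactual_prompt_pairs_alt (n_pairs : Int) : List (String × String) :=
  let reps := -(PySem.Int.floordiv (-n_pairs) (pvFormattedB.length : Int))
  PySem.List.slice ((List.replicate reps.toNat pvFormattedB).flatten) none (some n_pairs)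

-- ===== PRECONDITION & SPEC =====
def Spec_generate_counterfactual_prompt_pairs (n_pairs : Int) (out : List (String × String)) : Prop := out = generate_counterfactual_prompt_pairs_alt n_pairs
instance (n_pairs : Int) (out : List (String × String)) : Decidable (Spec_generate_counterfactual_prompt_pairs n_pairs out) := by unfold Spec_generate_counterfactual_prompt_pairs; infer_instance

-- ===== CLAIM =====
def Claim_equal_generate_counterfactual_prompt_pairs : Prop := ∀ (n_pairs : Int), Dom_generate_counterfactual_prompt_pairs n_pairs → Spec_generate_counterfactual_prompt_pairs n_pairs (generate_counterfactual_prompt_pairs n_pairs)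

-- ===== LEMMAS AND PROOFS =====
-- A's per-iteration pair equals the table entry at i % 10 (the 10 possible residues)
theorem pv_body_eq (i : Int) :
    (PySem.Str.replace (PySem.List.pyGetD pvTemplatesA (PySem.Int.mod i (pvTemplatesA.length : Int)) "") "{}" "male",
     PySem.Str.replace (PySem.List.pyGetD pvTemplatesA (PySem.Int.mod i (pvTemplatesA.length : Int)) "") "{}" "female")
    = PySem.List.pyGetD pvFormattedB (PySem.Int.mod i 10) ("", "") := by
  have hlenA : (pvTemplatesA.length : Int) = 10 := by decide
  rw [hlenA, PySem.Int.mod_eq_emod_of_pos (show (0:Int) < 10 by omega)]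
  have h0 : 0 ≤ i % 10 := Int.emod_nonneg i (by omega)
  have h1 : i % 10 < 10 := Int.emod_lt_of_pos i (by omega)
  interval_cases h : (i % 10) <;> decide

-- the cyclic-index map over range k equals the first k entries of r copies of the table
theorem pv_cycle (d : String × String) : ∀ (r k : Nat), k ≤ 10 * r →
    (List.range k).map (fun j => pvFormattedB.getD (j % 10) d)
      = ((List.replicate r pvFormattedB).flatten).take k := by
  intro r
  induction r with
  | zero =>
    intro k hk
    have hk0 : k = 0 := by omega
    subst hk0; simp
  | succ r ih =>
    intro k hk
    rw [List.replicate_succ, List.flatten_cons]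
    have hlen : pvFormattedB.length = 10 := by decide
    by_cases hk10 : k ≤ 10
    · rw [List.take_append_of_le_length (by omega)]
      apply List.ext_getElem
      · simp [pvFormattedB, pvTemplatesB]; omega
      · intro j hj _
        simp only [List.getElem_map, List.getElem_range, List.getElem_take]
        have hj10 : j < 10 := by simp at hj; omega
        rw [Nat.mod_eq_of_lt hj10, List.getD_eq_getElem]
    · push Not at hk10
      obtain ⟨m, rfl⟩ : ∃ m, k = 10 + m := ⟨k - 10, by omega⟩
      rw [List.range_add, List.map_append, List.map_map]
      rw [show (10 + m) = pvFormattedB.length + m by rw [hlen],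
          List.take_length_add_append]
      have h1 : (List.range 10).map (fun j => pvFormattedB.getD (j % 10) d) = pvFormattedB := by
        apply List.ext_getElem
        · simp [hlen]
        · intro j hj _
          simp only [List.getElem_map, List.getElem_range]
          have hj10 : j < 10 := by simpa using hj
          rw [Nat.mod_eq_of_lt hj10, List.getD_eq_getElem]
      have h2 : ((fun j => pvFormattedB.getD (j % 10) d) ∘ (fun x => 10 + x))
              = fun j => pvFormattedB.getD (j % 10) d := by
        funext j; simp [Function.comp]
      rw [h1, h2, ih m (by omega)]

theorem generate_counterfactual_prompt_pairs_eq_alt (n : Int) :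
    generate_counterfactual_prompt_pairs n = generate_counterfactual_prompt_pairs_alt n := by
  unfold generate_counterfactual_prompt_pairs generate_counterfactual_prompt_pairs_alt
  rw [PySem.List.foldl_append_singleton_eq_map, List.nil_append]
  show _ = PySem.List.slice
      ((List.replicate (-(PySem.Int.floordiv (-n) (pvFormattedB.length : Int))).toNat pvFormattedB).flatten)
      none (some n)
  have hlenF : (pvFormattedB.length : Int) = 10 := by decide
  rw [hlenF]
  by_cases hn : n ≤ 0
  · -- empty on both sides
    rw [PySem.List.pyRange_one_eq_nil hn, List.map_nil]
    have hr : (-(PySem.Int.floordiv (-n) 10)).toNat = 0 := by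
      have h1 : 0 ≤ PySem.Int.floordiv (-n) 10 := by
        rw [PySem.Int.floordiv_eq_ediv_of_pos (by omega)]
        exact Int.ediv_nonneg (by omega) (by omega)
      omega
    rw [hr]
    simp [PySem.List.slice]
  · push Not at hn
    obtain ⟨k, rfl⟩ : ∃ k : Nat, n = (k : Int) := ⟨n.toNat, by omega⟩
    set r := -(PySem.Int.floordiv (-(k : Int)) 10) with hr
    have hchar : ((r - 1) * 10 < (k : Int) ∧ (k : Int) ≤ r * 10) := by
      rw [hr, PySem.Int.neg_floordiv_neg_eq_iff_of_pos (by omega)] at *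
      exact (PySem.Int.neg_floordiv_neg_eq_iff_of_pos (by omega)).mp rfl
    have hr0 : 0 ≤ r := by nlinarith [hchar.1, hchar.2]
    have hk : k ≤ 10 * r.toNat := by omega
    rw [PySem.List.slice_to_natCast, PySem.List.pyRange_one 0 (k : Int)]
    have hk' : ((k : Int) - 0).toNat = k := by omega
    rw [hk', List.map_map]
    rw [← pv_cycle ("", "") r.toNat k hk]
    apply List.map_congr_left
    intro j hj
    simp only [Function.comp]
    rw [zero_add, pv_body_eq]
    have : PySem.Int.mod (j : Int) 10 = ((j % 10 : Nat) : Int) := PySem.Int.mod_natCast j 10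
    rw [this, PySem.List.pyGetD_natCast]

-- ===== VERDICT =====
theorem generate_counterfactual_prompt_pairs_spec : Claim_equal_generate_counterfactual_prompt_pairs := by
  intro n _
  exact generate_counterfactual_prompt_pairs_eq_alt n
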